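-- pv_equiv track=rewrite | github.com/Patstrom/Grundy | 0.56( fast sparse).py | gv_next
-- ===== SOURCE A (Python) =====
-- import math
--
-- def mex(lst):
--     i = 0
--     while i in lst:
--         i += 1
--     return i
--
-- def gv_next(lst):
--     length = len(lst) #n+1 for G_n
--     value_list = []
--     for i in range(1, math.ceil(length/2)):
--         value_list.append(lst[i]^lst[length-i-1])
--     for i in range(0, math.ceil(length/2)):
--         value_list.append(lst[i]^lst[length-i-2])
--     return mex(value_list)
-- ===== SOURCE B (Python) =====
-- def gv_next(lst):
--     n = len(lst)
--     m = (n + 1) // 2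
--     rev = list(reversed(lst))
--     rot = rev[1:] + rev[:1]
--     values = [x ^ y for x, y in zip(lst, rev)][1:m] \
--            + [x ^ y for x, y in zip(lst, rot)][:m]
--     # mex by one pass over the sorted values
--     c = 0
--     for v in sorted(values):
--         if v == c:
--             c += 1
--         elif v > c:
--             break
--     return c
-- ===== Notes on version B (the rewrite author's own statement) =====
-- stated objective: alternative
-- what changed: B builds the XOR value list without index loops -- zipping the list with its reverse and with the reverse rotated by one, then slicing -- and replaces A's mex (rescanning the whole list for each candidate 0,1,2,...) by sorting once and making a single linear pass that advances the candidate.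
import Mathlib
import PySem

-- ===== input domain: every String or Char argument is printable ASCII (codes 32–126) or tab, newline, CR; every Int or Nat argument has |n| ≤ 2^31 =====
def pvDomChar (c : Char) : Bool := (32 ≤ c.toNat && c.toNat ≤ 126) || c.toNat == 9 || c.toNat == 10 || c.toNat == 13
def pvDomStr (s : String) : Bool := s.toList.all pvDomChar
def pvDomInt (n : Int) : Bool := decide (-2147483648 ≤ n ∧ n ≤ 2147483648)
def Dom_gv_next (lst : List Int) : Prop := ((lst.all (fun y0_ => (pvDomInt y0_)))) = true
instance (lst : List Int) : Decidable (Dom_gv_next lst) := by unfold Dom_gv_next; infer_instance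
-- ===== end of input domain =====

-- B rebuilds the value list without index loops (reverse / rotate / zip / slices) and
-- replaces A's rescanning mex with a sort-then-single-pass mex (objective: alternative).

-- ===== PORT A =====
-- while i in lst: i += 1  — fuel lst.length + 1 always suffices (proved below):
-- i can only keep growing while 0..i-1 are all members, so the loop stops by i = length.
def mexAux (lst : List Int) : Nat → Int → Int
  | 0, i => i
  | fuel+1, i => if i ∈ lst then mexAux lst fuel (i+1) else i

def mex (lst : List Int) : Int := mexAux lst (lst.length + 1) 0

-- math.ceil(length/2) = (length+1)/2 exactly (length is a nonneg int well below 2^52,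
-- so the float division is exact).  lst[..] via pyGetD with default 0:
-- every index A uses is in Python range (first loop: 1 ≤ i < ceil(n/2) ≤ n, n-i-1 in range;
-- second loop: 0 ≤ i < ceil(n/2) ≤ n, and n-i-2 ≥ -1 with n ≥ 1), so the default is never taken.
def gv_next (lst : List Int) : Int :=
  let length : Int := lst.length
  let vl1 := (PySem.List.pyRange 1 ((length + 1) / 2) 1).foldl
    (fun acc i => acc ++ [PySem.Int.bxor (PySem.List.pyGetD lst i 0) (PySem.List.pyGetD lst (length - i - 1) 0)]) []
  let value_list := (PySem.List.pyRange 0 ((length + 1) / 2) 1).foldl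
    (fun acc i => acc ++ [PySem.Int.bxor (PySem.List.pyGetD lst i 0) (PySem.List.pyGetD lst (length - i - 2) 0)]) vl1
  mex value_list

-- ===== PORT B =====
-- one pass over the sorted values: bump the candidate on a hit, stop at the first gap
def smxAux : List Int → Int → Int
  | [], c => c
  | v :: t, c => if v = c then smxAux t (c+1) else if v > c then c else smxAux t c

def gv_next_alt (lst : List Int) : Int :=
  let n : Int := lst.length
  let m : Int := (n + 1) / 2
  let rev := lst.reverse
  let rot := PySem.List.slice rev (some 1) none ++ PySem.List.slice rev none (some 1)
  let values :=
    PySem.List.slice (List.zipWith (fun x y => PySem.Int.bxor x y) lst rev) (some 1) (some m)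
    ++ PySem.List.slice (List.zipWith (fun x y => PySem.Int.bxor x y) lst rot) none (some m)
  smxAux (PySem.List.sorted values (fun x => x) false) 0

-- ===== PRECONDITION & SPEC =====
def Spec_gv_next (lst : List Int) (out : Int) : Prop := out = gv_next_alt lst
instance (lst : List Int) (out : Int) : Decidable (Spec_gv_next lst out) := by unfold Spec_gv_next; infer_instance

-- ===== CLAIM (what is proved, stated in full; the proofs are below) =====
def Claim_equal_gv_next : Prop := ∀ (lst : List Int), Dom_gv_next lst → Spec_gv_next lst (gv_next lst)

-- ===== LEMMAS AND PROOFS =====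

-- if 0..i-1 all occur in l then i ≤ l.length
lemma below_mem_length (l : List Int) (i : Int) (h0 : 0 ≤ i)
    (hmem : ∀ j : Int, 0 ≤ j → j < i → j ∈ l) : i.toNat ≤ l.length := by
  have hsub : (Finset.range i.toNat).image (Int.ofNat) ⊆ l.toFinset := by
    intro x hx
    simp only [Finset.mem_image, Finset.mem_range] at hx
    obtain ⟨k, hk, rfl⟩ := hx
    exact List.mem_toFinset.mpr (hmem k (by positivity) (by omega))
  have hcard := Finset.card_le_card hsub
  rw [Finset.card_image_of_injective _ (fun a b h => Int.ofNat.inj h), Finset.card_range] at hcard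
  calc i.toNat ≤ l.toFinset.card := hcard
    _ ≤ l.length := l.toFinset_card_le

lemma mexAux_spec (l : List Int) : ∀ (fuel : Nat) (i : Int), 0 ≤ i →
    (∀ j : Int, 0 ≤ j → j < i → j ∈ l) → l.length + 1 ≤ i.toNat + fuel →
    mexAux l fuel i ∉ l ∧ 0 ≤ mexAux l fuel i ∧
      ∀ j : Int, 0 ≤ j → j < mexAux l fuel i → j ∈ l := by
  intro fuel
  induction fuel with
  | zero =>
    intro i h0 hmem hfuel
    have := below_mem_length l i h0 hmem
    omega
  | succ n ih =>
    intro i h0 hmem hfuel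
    by_cases hi : i ∈ l
    · have hstep : mexAux l (n+1) i = mexAux l n (i+1) := by simp [mexAux, hi]
      rw [hstep]
      refine ih (i+1) (by omega) ?_ (by omega)
      intro j hj0 hji
      rcases eq_or_lt_of_le (by omega : j ≤ i) with h | h
      · exact h ▸ hi
      · exact hmem j hj0 h
    · have hstep : mexAux l (n+1) i = i := by simp [mexAux, hi]
      rw [hstep]
      exact ⟨hi, h0, fun j hj0 hji => hmem j hj0 hji⟩

lemma smxAux_spec : ∀ (t : List Int) (c : Int), t.Pairwise (· ≤ ·) →
    c ≤ smxAux t c ∧ smxAux t c ∉ t ∧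
      ∀ j : Int, c ≤ j → j < smxAux t c → j ∈ t := by
  intro t
  induction t with
  | nil =>
    intro c _
    refine ⟨by simp [smxAux], by simp, ?_⟩
    intro j h1 h2
    simp only [smxAux] at h2
    omega
  | cons v t ih =>
    intro c hp
    rw [List.pairwise_cons] at hp
    obtain ⟨hv, hpt⟩ := hp
    by_cases h2 : v = c
    · have hstep : smxAux (v :: t) c = smxAux t (c+1) := by simp [smxAux, h2]
      obtain ⟨hle, hnm, hmem⟩ := ih (c+1) hpt
      rw [hstep]
      refine ⟨by omega, ?_, ?_⟩
      · simp only [List.mem_cons, not_or]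
        exact ⟨by omega, hnm⟩
      · intro j hj1 hj2
        rcases eq_or_lt_of_le hj1 with h | h
        · exact List.mem_cons.mpr (Or.inl (by omega))
        · exact List.mem_cons_of_mem _ (hmem j (by omega) hj2)
    · by_cases h1 : v > c
      · have hstep : smxAux (v :: t) c = c := by simp [smxAux, h1, h2]
        rw [hstep]
        refine ⟨le_refl c, ?_, fun j ha hb => absurd hb (by omega)⟩
        simp only [List.mem_cons, not_or]
        constructor
        · omega
        · intro hc
          have := hv c hc
          omega
      · have hstep : smxAux (v :: t) c = smxAux t c := by simp [smxAux, h1, h2]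
        obtain ⟨hle, hnm, hmem⟩ := ih c hpt
        rw [hstep]
        refine ⟨hle, ?_, fun j hj1 hj2 => List.mem_cons_of_mem _ (hmem j hj1 hj2)⟩
        simp only [List.mem_cons, not_or]
        exact ⟨by omega, hnm⟩

-- A's rescanning mex and B's sorted single-pass mex agree on every list
lemma mex_eq_smx (l : List Int) : mex l = smxAux (PySem.List.sorted l (fun x => x) false) 0 := by
  obtain ⟨ha1, ha2, ha3⟩ := mexAux_spec l (l.length + 1) 0 (le_refl 0)
    (fun j h1 h2 => absurd h2 (by omega)) (by omega)
  set s := PySem.List.sorted l (fun x => x) false with hs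
  have hpair : s.Pairwise (· ≤ ·) := PySem.List.sorted_pairwise l (fun x => x)
  obtain ⟨hb1, hb2, hb3⟩ := smxAux_spec s 0 hpair
  have hmem : ∀ x : Int, x ∈ s ↔ x ∈ l := fun x => PySem.List.mem_sorted l (fun y => y) false x
  rcases lt_trichotomy (mex l) (smxAux s 0) with h | h | h
  · exact absurd ((hmem _).mp (hb3 _ ha2 h)) ha1
  · exact h
  · exact absurd ((hmem _).mpr (ha3 _ hb1 h)) hb2

-- A's first index loop produces exactly B's slice of lst zipped with its reverse
lemma first_half (lst : List Int) :
    (PySem.List.pyRange 1 (((lst.length : Int) + 1) / 2) 1).map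
      (fun i => PySem.Int.bxor (PySem.List.pyGetD lst i 0)
        (PySem.List.pyGetD lst ((lst.length : Int) - i - 1) 0))
    = PySem.List.slice (List.zipWith (fun x y => PySem.Int.bxor x y) lst lst.reverse)
        (some 1) (some (((lst.length : Int) + 1) / 2)) := by
  have hM : (((lst.length : Int) + 1) / 2).toNat = (lst.length + 1) / 2 := by omega
  rw [PySem.List.slice_toNat _ (by omega) (by omega)]
  apply List.ext_getElem
  · simp [PySem.List.length_pyRange_one, hM]
    omega
  · intro k hk1 hk2
    simp [PySem.List.length_pyRange_one] at hk1 hk2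
    have hkM : (k : Int) < ((lst.length : Int) + 1) / 2 - 1 := by omega
    have hn : 2 ≤ lst.length := by omega
    simp only [List.getElem_map, PySem.List.getElem_pyRange_one, List.getElem_take,
      List.getElem_drop, List.getElem_zipWith, List.getElem_reverse]
    rw [PySem.List.pyGetD_eq_getElem _ _ (by omega) (by omega),
        PySem.List.pyGetD_eq_getElem _ _ (by omega) (by omega)]
    congr 1 <;> congr 1 <;> omega

-- A's second index loop produces exactly B's slice of lst zipped with the rotated reverse
lemma second_half (lst : List Int) :
    (PySem.List.pyRange 0 (((lst.length : Int) + 1) / 2) 1).map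
      (fun i => PySem.Int.bxor (PySem.List.pyGetD lst i 0)
        (PySem.List.pyGetD lst ((lst.length : Int) - i - 2) 0))
    = PySem.List.slice (List.zipWith (fun x y => PySem.Int.bxor x y) lst
        (PySem.List.slice lst.reverse (some 1) none ++ PySem.List.slice lst.reverse none (some 1)))
        none (some (((lst.length : Int) + 1) / 2)) := by
  rw [PySem.List.slice_from_one, PySem.List.slice_to _ (by omega),
      PySem.List.slice_to _ (by omega)]
  match lst with
  | [] => decide
  | [a] =>
    simp [PySem.List.pyGetD, PySem.List.pyGet?,
      PySem.List.pyIdx?, PySem.List.pyRange]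
  | a :: b :: t =>
    set l := a :: b :: t with hl
    have hn : 2 ≤ l.length := by simp [hl]
    have hM : (((l.length : Int) + 1) / 2).toNat = (l.length + 1) / 2 := by omega
    apply List.ext_getElem
    · simp [PySem.List.length_pyRange_one, hM]
      omega
    · intro k hk1 hk2
      simp [PySem.List.length_pyRange_one] at hk1 hk2
      have hkM : (k : Int) < ((l.length : Int) + 1) / 2 := by omega
      -- k < ceil(n/2) ≤ n - 1 for n ≥ 2, so k + 1 < n and the rotated index is rev[k+1]
      have hklt : k + 1 < l.length := by omega
      simp only [List.getElem_map, PySem.List.getElem_pyRange_one, List.getElem_take,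
        List.getElem_zipWith]
      rw [List.getElem_append_left (by simp; omega)]
      rw [List.getElem_tail, List.getElem_reverse]
      rw [PySem.List.pyGetD_eq_getElem _ _ (by omega) (by omega),
          PySem.List.pyGetD_eq_getElem _ _ (by omega) (by omega)]
      congr 1 <;> congr 1 <;> omega

-- ===== VERDICT (by name: the statement is the Claim_ definition above) =====
theorem gv_next_spec : Claim_equal_gv_next := by
  intro lst _
  show gv_next lst = gv_next_alt lst
  simp only [gv_next, gv_next_alt, PySem.List.foldl_append_singleton_eq_map, List.nil_append]
  rw [first_half, second_half]
  exact mex_eq_smx _
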